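-- pv_equiv track=rewrite | github.com/klumpra/faculty_evaluation_report_tool | evals.py | get_courses_by_program
-- ===== SOURCE A (Python) =====
-- def get_courses_by_program(courses):
--     courses_by_program = {}
--     for course in courses:
--         program = course[:4]
--         if program not in courses_by_program:
--             courses_by_program[program] = []
--         courses_by_program[program].append(course)
--     for cbp in courses_by_program:
--         courses_by_program[cbp].sort()
--     return courses_by_program
-- ===== SOURCE B (Python) =====
-- def get_courses_by_program(courses):
--     groups = {}
--     for c in sorted(courses):
--         groups.setdefault(c[:4], []).append(c)
--     return {c[:4]: groups[c[:4]] for c in courses}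
-- ===== Notes on version B (the rewrite author's own statement) =====
-- stated objective: alternative
-- what changed: A groups the input in encounter order and then runs a second loop sorting each group in place; B sorts the whole input once, groups the pre-sorted list in a single setdefault pass (so every group comes out already sorted, no per-group sort exists), and a final comprehension keys the result in the input's first-appearance order.
import Mathlib
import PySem

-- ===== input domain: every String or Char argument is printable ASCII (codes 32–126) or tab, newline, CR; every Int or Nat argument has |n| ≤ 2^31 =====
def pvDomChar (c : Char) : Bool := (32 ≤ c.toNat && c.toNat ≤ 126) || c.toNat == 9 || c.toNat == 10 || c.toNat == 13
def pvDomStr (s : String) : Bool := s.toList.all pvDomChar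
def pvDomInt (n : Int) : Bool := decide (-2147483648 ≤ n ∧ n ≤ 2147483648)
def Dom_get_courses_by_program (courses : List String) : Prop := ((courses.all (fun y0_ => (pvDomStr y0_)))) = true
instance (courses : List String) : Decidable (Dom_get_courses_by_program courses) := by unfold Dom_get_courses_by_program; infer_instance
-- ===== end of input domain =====

-- B replaces A's build-groups-then-sort-each-group passes by one global sort followed by a single
-- grouping pass over the sorted list (groups come out already sorted) plus a comprehension restoring
-- the keys' input first-appearance order; same output, including dict order.

-- ===== PORT A =====
def get_courses_by_program (courses : List String) : List (String × List String) :=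
  let cbp := courses.foldl
    (fun cbp course =>
      (if cbp.contains (PySem.Str.slice course none (some 4)) then cbp
       else cbp.insert (PySem.Str.slice course none (some 4)) []).modify
        (PySem.Str.slice course none (some 4)) [] (fun v => v ++ [course]))
    PySem.Dict.empty
  (cbp.keys.foldl (fun cbp k => cbp.modify k [] (fun v => PySem.List.sorted v (fun x => x) false)) cbp).items

-- ===== PORT B =====
def get_courses_by_program_alt (courses : List String) : List (String × List String) :=
  let ordered := PySem.List.sorted courses (fun x => x) false
  -- groups.setdefault(c[:4], []).append(c) = modify with default [] (insert [] then append to it)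
  let groups := ordered.foldl
    (fun d c => d.modify (PySem.Str.slice c none (some 4)) [] (fun v => v ++ [c]))
    PySem.Dict.empty
  -- groups[c[:4]] ported as getD with []: the key is always present (c's own prefix was grouped)
  (courses.foldl
    (fun d c => d.insert (PySem.Str.slice c none (some 4)) (groups.getD (PySem.Str.slice c none (some 4)) []))
    PySem.Dict.empty).items

-- ===== PRECONDITION & SPEC =====
def Spec_get_courses_by_program (courses : List String) (out : List (String × List String)) : Prop := out = get_courses_by_program_alt courses
instance (courses : List String) (out : List (String × List String)) : Decidable (Spec_get_courses_by_program courses out) := by unfold Spec_get_courses_by_program; infer_instance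

-- ===== CLAIM (what is proved, stated in full; the proofs are below) =====
def Claim_equal_get_courses_by_program : Prop := ∀ (courses : List String), Dom_get_courses_by_program courses → Spec_get_courses_by_program courses (get_courses_by_program courses)

-- ===== LEMMAS AND PROOFS =====

-- Python's sort commutes with filter: filtering a sorted list gives the sort of the filtered list.
theorem sorted_filter_comm (l : List String) (q : String → Bool) :
    PySem.List.sorted (l.filter q) (fun x => x) false = (PySem.List.sorted l (fun x => x) false).filter q := by
  refine (PySem.List.sorted_id_eq_of_perm_of_pairwise _ _ ?_ ?_)
  · exact (PySem.List.sorted_perm l _ _).filter q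
  · exact List.Pairwise.sublist (List.filter_sublist) (PySem.List.sorted_pairwise (key := fun x => x) (xs := l))

-- A's grouping loop, characterised: keys in first-appearance order, each with its input-order group.
theorem groupA_items (key : String → String) (cs : List String) :
    (cs.foldl
      (fun d c => (if d.contains (key c) then d else d.insert (key c) []).modify (key c) [] (fun v => v ++ [c]))
      PySem.Dict.empty).items
    = (PySem.Set.ofList (cs.map key)).map (fun k => (k, cs.filter (fun c => key c == k))) := by
  induction cs using List.reverseRecOn with
  | nil => rfl
  | append_singleton cs c ih =>
    rw [List.foldl_append, List.foldl_cons, List.foldl_nil]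
    set D := cs.foldl
      (fun d c => (if d.contains (key c) then d else d.insert (key c) []).modify (key c) [] (fun v => v ++ [c]))
      PySem.Dict.empty with hD
    have hkeys : D.keys = PySem.Set.ofList (cs.map key) := by
      rw [show D.keys = D.items.map (·.1) from rfl, ih]
      simp [Function.comp_def]
    have hnd : D.keys.Nodup := by rw [hkeys]; exact PySem.Set.nodup_ofList _
    rw [List.map_append, PySem.Set.ofList_eq_foldl, List.foldl_append, ← PySem.Set.ofList_eq_foldl]
    simp only [List.map_cons, List.map_nil, List.foldl_cons, List.foldl_nil]
    by_cases hp : key c ∈ PySem.Set.ofList (cs.map key)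
    · have hc : D.contains (key c) = true := by rw [PySem.Dict.contains_iff_mem_keys, hkeys]; exact hp
      have hg : D.getD (key c) [] = cs.filter (fun c' => key c' == key c) := by
        refine PySem.Dict.getD_of_mem_items D ?_ hnd []
        rw [ih]
        exact List.mem_map_of_mem hp
      have hmod : ((if D.contains (key c) = true then D else D.insert (key c) []).modify (key c) [] fun v => v ++ [c])
          = D.insert (key c) (cs.filter (fun c' => key c' == key c) ++ [c]) := by
        rw [if_pos hc]
        rw [show D.modify (key c) [] (fun v => v ++ [c])
            = D.insert (key c) ((fun v => v ++ [c]) (D.getD (key c) [])) from rfl, hg]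
      rw [hmod, PySem.Dict.items_insert_of_contains _ _ hc, ih, List.map_map]
      have hadd : PySem.Set.add (PySem.Set.ofList (cs.map key)) (key c) = PySem.Set.ofList (cs.map key) := by
        simp [PySem.Set.add, hp]
      rw [hadd]
      refine List.map_congr_left ?_
      intro k hk
      by_cases hkc : k = key c
      · subst hkc; simp [List.filter_append]
      · have : ((k, List.filter (fun c' => key c' == k) cs).1 == key c) = false := by
          simpa [beq_iff_eq] using hkc
        simp only [Function.comp_apply, this, Bool.false_eq_true, if_false, List.filter_append,
          List.filter_cons, List.filter_nil]
        have : (key c == k) = false := by simp; exact fun h => hkc h.symm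
        simp [this]
    · have hc : D.contains (key c) = false := by
        rw [← Bool.not_eq_true, PySem.Dict.contains_iff_mem_keys, hkeys]; exact hp
      have hc2 : (D.insert (key c) []).contains (key c) = true := PySem.Dict.contains_insert_self ..
      have hmod : ((if D.contains (key c) = true then D else D.insert (key c) []).modify (key c) [] fun v => v ++ [c])
          = (D.insert (key c) []).insert (key c) [c] := by
        rw [hc]; simp only [Bool.false_eq_true, if_false]
        rw [show (D.insert (key c) []).modify (key c) [] (fun v => v ++ [c])
            = (D.insert (key c) []).insert (key c) ((fun v => v ++ [c]) ((D.insert (key c) []).getD (key c) [])) from rfl]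
        rw [PySem.Dict.getD_insert_self]
        rfl
      rw [hmod, PySem.Dict.items_insert_of_contains _ _ hc2,
        PySem.Dict.items_insert_of_not_contains _ _ hc, List.map_append, ih, List.map_map]
      have hadd : PySem.Set.add (PySem.Set.ofList (cs.map key)) (key c) = PySem.Set.ofList (cs.map key) ++ [key c] := by
        simp [PySem.Set.add, hp]
      rw [hadd, List.map_append]
      have hfc : ∀ k ∈ PySem.Set.ofList (cs.map key), (key c == k) = false := by
        intro k hk
        simp only [beq_eq_false_iff_ne, ne_eq]
        rintro rfl; exact hp hk
      congr 1
      · refine List.map_congr_left ?_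
        intro k hk
        have h1 : ((k, List.filter (fun c' => key c' == k) cs).1 == key c) = false := by
          simp only [beq_eq_false_iff_ne, ne_eq]; rintro rfl; exact hp hk
        simp only [List.filter_append, List.filter_cons, List.filter_nil, hfc k hk,
          Bool.false_eq_true, if_false, List.append_nil]
        simp
        exact fun h => absurd (h ▸ hk) hp
      · have hnil : cs.filter (fun c' => key c' == key c) = [] := by
          rw [List.filter_eq_nil_iff]
          intro a ha
          simp only [Bool.not_eq_true, beq_eq_false_iff_ne, ne_eq]
          intro h; exact hp (by rw [← h]; exact (PySem.Set.mem_ofList _ _).2 (List.mem_map_of_mem ha))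
        simp [List.filter_append, hnil]

-- B's grouping step equals A's: modify with default [] is exactly insert-[]-then-append.
theorem group_step_eq (key : String → String) :
    (fun (d : PySem.Dict String (List String)) c => d.modify (key c) [] (fun v => v ++ [c]))
      = (fun (d : PySem.Dict String (List String)) c =>
          (if d.contains (key c) then d else d.insert (key c) []).modify (key c) [] (fun v => v ++ [c])) := by
  funext d c
  by_cases h : d.contains (key c) = true
  · rw [if_pos h]
  · rw [if_neg h]
    have hget : d.getD (key c) [] = [] := PySem.Dict.getD_of_not_contains d [] (by simpa using h)
    rw [show d.modify (key c) [] (fun v => v ++ [c])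
        = d.insert (key c) ((fun v => v ++ [c]) (d.getD (key c) [])) from rfl, hget,
      show (d.insert (key c) []).modify (key c) [] (fun v => v ++ [c])
        = (d.insert (key c) []).insert (key c) ((fun v => v ++ [c]) ((d.insert (key c) []).getD (key c) [])) from rfl,
      PySem.Dict.getD_insert_self]
    apply PySem.Dict.ext
    rw [PySem.Dict.items_insert_of_not_contains d _ (by simpa using h),
      PySem.Dict.items_insert_of_contains _ _ (PySem.Dict.contains_insert_self ..),
      PySem.Dict.items_insert_of_not_contains d _ (by simpa using h), List.map_append]
    have hne : ∀ q ∈ d.items, (q.1 == key c) = false := by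
      intro q hq
      simp only [beq_eq_false_iff_ne, ne_eq]
      intro hqk
      have : d.contains (key c) = true := by
        rw [PySem.Dict.contains_iff_mem_keys, ← hqk]
        exact List.mem_map_of_mem hq
      exact h this
    congr 1
    · refine Eq.symm ?_
      refine (List.map_congr_left ?_).trans (List.map_id _)
      intro q hq
      simp [hne q hq]
    · simp

-- B's grouping loop, characterised via A's.
theorem groupC_items (key : String → String) (cs : List String) :
    (cs.foldl (fun d c => d.modify (key c) [] (fun v => v ++ [c])) PySem.Dict.empty).items
    = (PySem.Set.ofList (cs.map key)).map (fun k => (k, cs.filter (fun c => key c == k))) := by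
  rw [group_step_eq key]; exact groupA_items key cs

-- B's comprehension loop, characterised likewise (value function independent of the traversal).
theorem groupB_items (key : String → String) (v : String → List String) (cs : List String) :
    (cs.foldl (fun d c => d.insert (key c) (v (key c))) PySem.Dict.empty).items
    = (PySem.Set.ofList (cs.map key)).map (fun k => (k, v k)) := by
  induction cs using List.reverseRecOn with
  | nil => rfl
  | append_singleton cs c ih =>
    rw [List.foldl_append, List.foldl_cons, List.foldl_nil]
    have hkeys : (cs.foldl (fun d c => d.insert (key c) (v (key c))) PySem.Dict.empty).keys
        = PySem.Set.ofList (cs.map key) := by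
      rw [show (cs.foldl (fun d c => d.insert (key c) (v (key c))) PySem.Dict.empty).keys
          = (cs.foldl (fun d c => d.insert (key c) (v (key c))) PySem.Dict.empty).items.map (·.1) from rfl, ih]
      simp [Function.comp_def]
    rw [List.map_append, PySem.Set.ofList_eq_foldl, List.foldl_append, ← PySem.Set.ofList_eq_foldl]
    simp only [List.map_cons, List.map_nil, List.foldl_cons, List.foldl_nil]
    by_cases hp : key c ∈ PySem.Set.ofList (cs.map key)
    · have hc : (cs.foldl (fun d c => d.insert (key c) (v (key c))) PySem.Dict.empty).contains (key c) = true := by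
        rw [PySem.Dict.contains_iff_mem_keys, hkeys]; exact hp
      rw [PySem.Dict.items_insert_of_contains _ _ hc, ih, List.map_map]
      have hadd : PySem.Set.add (PySem.Set.ofList (cs.map key)) (key c) = PySem.Set.ofList (cs.map key) := by
        simp [PySem.Set.add, hp]
      rw [hadd]
      refine List.map_congr_left ?_
      intro k hk
      by_cases hkc : k = key c
      · simp [hkc]
      · simp [Function.comp, hkc]
    · have hc : (cs.foldl (fun d c => d.insert (key c) (v (key c))) PySem.Dict.empty).contains (key c) = false := by
        rw [← Bool.not_eq_true, PySem.Dict.contains_iff_mem_keys, hkeys]; exact hp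
      rw [PySem.Dict.items_insert_of_not_contains _ _ hc, ih]
      have hadd : PySem.Set.add (PySem.Set.ofList (cs.map key)) (key c) = PySem.Set.ofList (cs.map key) ++ [key c] := by
        simp [PySem.Set.add, hp]
      rw [hadd, List.map_append]
      simp

-- A's second loop applies f to the value of every key it visits (keys distinct, all present).
theorem sortFold_items (f : List String → List String) (ks : List String) :
    ∀ (d : PySem.Dict String (List String)), ks.Nodup → d.keys.Nodup → (∀ k ∈ ks, d.contains k = true) →
      (ks.foldl (fun d k => d.modify k [] f) d).items
        = d.items.map (fun p => if p.1 ∈ ks then (p.1, f p.2) else p) := by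
  induction ks with
  | nil => intro d _ _ _; simp
  | cons k ks ih =>
    intro d hnodup hnd hcont
    rw [List.foldl_cons]
    have hck : d.contains k = true := hcont k (List.mem_cons_self ..)
    have hmod : d.modify k [] f = d.insert k (f (d.getD k [])) := rfl
    have hkeys : (d.modify k [] f).keys = d.keys := by
      rw [hmod]; exact PySem.Dict.keys_insert_of_contains _ _ hck
    have hrec := ih (d.modify k [] f) hnodup.of_cons (hkeys ▸ hnd) (by
      intro k' hk'
      rw [hmod, PySem.Dict.contains_insert]
      rw [hcont k' (List.mem_cons_of_mem _ hk')]
      simp)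
    rw [hrec, hmod, PySem.Dict.items_insert_of_contains _ _ hck, List.map_map]
    refine List.map_congr_left ?_
    intro p hp
    have hpfst : d.getD p.1 [] = p.2 := PySem.Dict.getD_of_mem_items d (by simpa using hp) hnd []
    by_cases hpk : p.1 = k
    · have hknotin : k ∉ ks := (List.nodup_cons.1 hnodup).1
      simp only [Function.comp_apply, ← hpk, hpfst]
      simp [hknotin, hpk]
    · have hb : (p.1 == k) = false := by simp [hpk]
      simp only [Function.comp_apply, hb, Bool.false_eq_true, if_false]
      simp [List.mem_cons, hpk]

-- ===== VERDICT (by name: the statement is the Claim_ definition above) =====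
theorem get_courses_by_program_spec : Claim_equal_get_courses_by_program := by
  intro courses _
  unfold Spec_get_courses_by_program get_courses_by_program get_courses_by_program_alt
  simp only []
  set ordered := PySem.List.sorted courses (fun x => x) false with hord
  set groups := ordered.foldl
    (fun d c => d.modify (PySem.Str.slice c none (some 4)) [] (fun v => v ++ [c]))
    PySem.Dict.empty with hgroups
  have hgI := groupC_items (fun c => PySem.Str.slice c none (some 4)) ordered
  have hgnd : groups.keys.Nodup := by
    rw [show groups.keys = groups.items.map (·.1) from rfl, hgI]
    simp only [List.map_map]
    simp only [Function.comp_def, List.map_id']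
    exact PySem.Set.nodup_ofList (ordered.map (fun c => PySem.Str.slice c none (some 4)))
  have hv : ∀ k ∈ PySem.Set.ofList (courses.map (fun c => PySem.Str.slice c none (some 4))),
      groups.getD k [] = ordered.filter (fun x => PySem.Str.slice x none (some 4) == k) := by
    intro k hk
    refine PySem.Dict.getD_of_mem_items groups ?_ hgnd []
    rw [hgI]
    refine List.mem_map_of_mem ?_
    have hk' := (PySem.Set.mem_ofList _ _).1 hk
    rcases List.mem_map.1 hk' with ⟨c, hc, hck⟩
    refine (PySem.Set.mem_ofList _ _).2 (List.mem_map.2 ⟨c, ?_, hck⟩)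
    exact (PySem.List.mem_sorted courses (fun x => x) false c).2 hc
  have hB := groupB_items (fun c => PySem.Str.slice c none (some 4))
    (fun k => groups.getD k []) courses
  rw [hB]
  have hA := groupA_items (fun c => PySem.Str.slice c none (some 4)) courses
  set D := courses.foldl
    (fun cbp course =>
      (if cbp.contains (PySem.Str.slice course none (some 4)) then cbp
       else cbp.insert (PySem.Str.slice course none (some 4)) []).modify
        (PySem.Str.slice course none (some 4)) [] (fun v => v ++ [course]))
    PySem.Dict.empty with hD
  have hkeys : D.keys = PySem.Set.ofList (courses.map (fun c => PySem.Str.slice c none (some 4))) := by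
    rw [show D.keys = D.items.map (·.1) from rfl, hA]
    simp [Function.comp_def]
  have hnd : D.keys.Nodup := by rw [hkeys]; exact PySem.Set.nodup_ofList _
  have hcont : ∀ k ∈ D.keys, D.contains k = true := by
    intro k hk; rw [PySem.Dict.contains_iff_mem_keys]; exact hk
  rw [sortFold_items _ D.keys D hnd hnd hcont]
  have hmem : ∀ p ∈ D.items, p.1 ∈ D.keys := by
    intro p hp; exact List.mem_map_of_mem hp
  have : D.items.map (fun p => if p.1 ∈ D.keys then (p.1, PySem.List.sorted p.2 (fun x => x) false) else p)
      = D.items.map (fun p => (p.1, PySem.List.sorted p.2 (fun x => x) false)) := by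
    refine List.map_congr_left ?_
    intro p hp; rw [if_pos (hmem p hp)]
  rw [this, hA, List.map_map]
  refine List.map_congr_left ?_
  intro k hk
  simp only [Function.comp_apply]
  rw [sorted_filter_comm, hv k hk]
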